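-- pv_equiv track=rewrite | github.com/saltstack/salt | salt/utils/network.py | cidr_to_ipv4_netmask
-- ===== SOURCE A (Python) =====
-- def cidr_to_ipv4_netmask(cidr_bits):
--     """
--     Returns an IPv4 netmask
--     """
--     try:
--         cidr_bits = int(cidr_bits)
--         if not 1 <= cidr_bits <= 32:
--             return ""
--     except ValueError:
--         return ""
--
--     netmask = ""
--     for idx in range(4):
--         if idx:
--             netmask += "."
--         if cidr_bits >= 8:
--             netmask += "255"
--             cidr_bits -= 8
--         else:
--             netmask += "{:d}".format(256 - (2 ** (8 - cidr_bits)))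
--             cidr_bits = 0
--     return netmask
-- ===== SOURCE B (Python) =====
-- def cidr_to_ipv4_netmask(cidr_bits):
--     """
--     Returns an IPv4 netmask
--     """
--     try:
--         cidr_bits = int(cidr_bits)
--         if not 1 <= cidr_bits <= 32:
--             return ""
--     except ValueError:
--         return ""
--
--     mask = (0xFFFFFFFF << (32 - cidr_bits)) & 0xFFFFFFFF
--     return ".".join(str((mask >> shift) & 0xFF) for shift in (24, 16, 8, 0))
-- ===== Notes on version B (the rewrite author's own statement) =====
-- stated objective: idiomatic
-- what changed: Replaces the four-iteration octet loop with per-octet subtraction and mutable remaining-bits state by a closed-form 32-bit mask computed with one shift-and-AND, then extracts the four octets by shifts and joins them.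
import Mathlib
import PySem

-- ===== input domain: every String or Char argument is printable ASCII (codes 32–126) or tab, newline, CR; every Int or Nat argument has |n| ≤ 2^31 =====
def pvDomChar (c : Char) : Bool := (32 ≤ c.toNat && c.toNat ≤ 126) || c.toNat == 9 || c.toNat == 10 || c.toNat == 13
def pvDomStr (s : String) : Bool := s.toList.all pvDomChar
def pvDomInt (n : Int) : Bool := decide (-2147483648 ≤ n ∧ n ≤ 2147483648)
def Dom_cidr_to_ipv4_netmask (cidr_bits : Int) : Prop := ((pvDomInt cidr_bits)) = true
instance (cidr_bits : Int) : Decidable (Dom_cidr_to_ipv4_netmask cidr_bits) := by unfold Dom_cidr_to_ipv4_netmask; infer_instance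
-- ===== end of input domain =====

-- B replaces A's octet-by-octet subtraction loop by a closed-form 32-bit mask (shift/AND) and octet extraction; same result, idiomatic.

-- ===== PORT A =====
def cidr_to_ipv4_netmask (cidr_bits : Int) : String :=
  -- int(cidr_bits) is the identity on an Int argument; ValueError cannot occur
  if ¬ (1 ≤ cidr_bits ∧ cidr_bits ≤ 32) then ""
  else
    -- for idx in range(4): build netmask, decrement cidr_bits
    (((List.range 4).foldl
      (fun (st : String × Int) (idx : Nat) =>
        let nm := if idx ≠ 0 then st.1 ++ "." else st.1
        if st.2 ≥ 8 then (nm ++ "255", st.2 - 8)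
        else (nm ++ PySem.Int.toStr (256 - 2 ^ (8 - st.2).toNat), 0))
      ("", cidr_bits))).1

-- ===== PORT B =====
def cidr_to_ipv4_netmask_alt (cidr_bits : Int) : String :=
  if ¬ (1 ≤ cidr_bits ∧ cidr_bits ≤ 32) then ""
  else
    let mask : Int := Int.land (Int.shiftLeft 0xFFFFFFFF (32 - cidr_bits).toNat) 0xFFFFFFFF
    String.intercalate "."
      (([24, 16, 8, 0] : List Nat).map (fun shift => PySem.Int.toStr (Int.land (Int.shiftRight mask shift) 0xFF)))

-- ===== PRECONDITION & SPEC =====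
def Spec_cidr_to_ipv4_netmask (cidr_bits : Int) (out : String) : Prop := out = cidr_to_ipv4_netmask_alt cidr_bits
instance (cidr_bits : Int) (out : String) : Decidable (Spec_cidr_to_ipv4_netmask cidr_bits out) := by unfold Spec_cidr_to_ipv4_netmask; infer_instance

-- ===== CLAIM (what is proved, stated in full; the proofs are below) =====
def Claim_equal_cidr_to_ipv4_netmask : Prop := ∀ (cidr_bits : Int), Dom_cidr_to_ipv4_netmask cidr_bits → Spec_cidr_to_ipv4_netmask cidr_bits (cidr_to_ipv4_netmask cidr_bits)

-- ===== LEMMAS AND PROOFS =====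

-- ===== VERDICT (by name: the statement is the Claim_ definition above) =====
theorem cidr_to_ipv4_netmask_spec : Claim_equal_cidr_to_ipv4_netmask := by
  intro n _
  unfold Spec_cidr_to_ipv4_netmask
  by_cases h : 1 ≤ n ∧ n ≤ 32
  · obtain ⟨h1, h2⟩ := h
    interval_cases n <;> decide
  · simp only [cidr_to_ipv4_netmask, cidr_to_ipv4_netmask_alt, h, not_false_iff, if_pos]
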